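-- pv_equiv track=rewrite | github.com/slothgsr/Xword | tutortest.py | wordfinder
-- ===== SOURCE A (Python) =====
-- def wordfinder(arg1, arg2): #arg1 = combo,  arg2 = Gridlist
--     grid = arg2.copy()
--     for letter in arg1:
--         if len(grid) <=1:
--             break
--         remove = []
--         for word in grid:
--             if letter in word:
--                 remove.append(word)
--         for i in remove:
--             grid.remove(i)
--
--     return len(grid)
-- ===== SOURCE B (Python) =====
-- def wordfinder(arg1, arg2):
--     n = len(arg1)
--     # first position of each letter of arg1
--     pos = {}
--     for i, ch in enumerate(arg1):
--         if ch not in pos: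
--             pos[ch] = i
--     # cnt[r] = number of words whose first eliminating letter is arg1[r]
--     cnt = {}
--     for word in arg2:
--         r = n
--         for c in word:
--             p = pos.get(c)
--             if p is not None and p < r:
--                 r = p
--         cnt[r] = cnt.get(r, 0) + 1
--     survivors = len(arg2)
--     for k in range(n):
--         if survivors <= 1:
--             return survivors
--         survivors -= cnt.get(k, 0)
--     return survivors
-- ===== Notes on version B (the rewrite author's own statement) =====
-- stated objective: faster
-- what changed: Replaces the per-letter grid rescans and O(n) list removals with a one-pass letter->first-index table, a per-word first-eliminating-letter index, a count per index, and a single arithmetic survivors loop that replicates the early break.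
import Mathlib
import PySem

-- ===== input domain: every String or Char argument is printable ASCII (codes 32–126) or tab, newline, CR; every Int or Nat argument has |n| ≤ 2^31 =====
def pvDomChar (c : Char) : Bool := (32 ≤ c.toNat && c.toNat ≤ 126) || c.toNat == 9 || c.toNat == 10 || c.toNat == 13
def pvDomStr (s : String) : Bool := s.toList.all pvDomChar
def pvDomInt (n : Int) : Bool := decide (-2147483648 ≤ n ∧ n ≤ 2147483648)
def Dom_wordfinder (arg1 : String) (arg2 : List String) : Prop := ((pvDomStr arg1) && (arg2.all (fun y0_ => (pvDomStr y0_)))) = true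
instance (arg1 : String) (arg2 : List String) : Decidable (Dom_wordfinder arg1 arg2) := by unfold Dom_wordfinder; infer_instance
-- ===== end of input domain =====

-- B replaces A's repeated grid scans and O(n) removals by a one-pass letter→first-index table
-- plus per-word first-elimination indices and a counting loop (objective: faster, asymptotic).

-- ===== PORT A =====
-- 'for i in remove: grid.remove(i)'; every i is drawn from grid so remove never raises;
-- getD is the no-raise reading of that always-successful remove.
def wfRemoveAll (grid : List String) (remove : List String) : List String :=
  remove.foldl (fun g i => (PySem.List.remove? g i).getD g) grid

-- the outer 'for letter in arg1' with its 'break'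
def wfLoopA : List Char → List String → List String
  | [], grid => grid
  | letter :: rest, grid =>
    if grid.length ≤ 1 then grid
    else
      let remove := grid.foldl
        (fun acc word => if PySem.Chars.isIn [letter] word.toList then acc ++ [word] else acc) []
      wfLoopA rest (wfRemoveAll grid remove)

def wordfinder (arg1 : String) (arg2 : List String) : Int :=
  ((wfLoopA arg1.toList arg2).length : Int)

-- ===== PORT B =====
-- pos = {}; for i, ch in enumerate(arg1): if ch not in pos: pos[ch] = i
def wfPos (cs : List Char) : PySem.Dict Char Int :=
  (PySem.List.enumerate cs).foldl
    (fun d p => if d.contains p.2 then d else d.insert p.2 p.1) PySem.Dict.empty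

-- r = n; for c in word: p = pos.get(c); if p is not None and p < r: r = p
def wfR (pos : PySem.Dict Char Int) (n : Int) (word : String) : Int :=
  word.toList.foldl
    (fun r c => match pos.get? c with
      | some p => if p < r then p else r
      | none => r) n

-- cnt = {}; for word in arg2: … ; cnt[r] = cnt.get(r, 0) + 1
def wfCnt (pos : PySem.Dict Char Int) (n : Int) (words : List String) : PySem.Dict Int Int :=
  words.foldl (fun d w => d.insert (wfR pos n w) (d.getD (wfR pos n w) 0 + 1)) PySem.Dict.empty

-- for k in range(n): if survivors <= 1: return survivors; survivors -= cnt.get(k, 0)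
def wfLoopB (cnt : PySem.Dict Int Int) : List Int → Int → Int
  | [], survivors => survivors
  | k :: ks, survivors =>
    if survivors ≤ 1 then survivors
    else wfLoopB cnt ks (survivors - cnt.getD k 0)

def wordfinder_alt (arg1 : String) (arg2 : List String) : Int :=
  let n : Int := (arg1.toList.length : Int)
  let pos := wfPos arg1.toList
  let cnt := wfCnt pos n arg2
  wfLoopB cnt (PySem.List.pyRange 0 n 1) ((arg2.length : Int))

-- ===== PRECONDITION & SPEC =====
def Spec_wordfinder (arg1 : String) (arg2 : List String) (out : Int) : Prop := out = wordfinder_alt arg1 arg2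
instance (arg1 : String) (arg2 : List String) (out : Int) : Decidable (Spec_wordfinder arg1 arg2 out) := by unfold Spec_wordfinder; infer_instance

-- ===== CLAIM (what is proved, stated in full; the proofs are below) =====
def Claim_equal_wordfinder : Prop := ∀ (arg1 : String) (arg2 : List String), Dom_wordfinder arg1 arg2 → Spec_wordfinder arg1 arg2 (wordfinder arg1 arg2)

-- ===== LEMMAS AND PROOFS =====

-- index (into cs) of the first letter of cs occurring in w; cs.length if none
def rN (w : List Char) : List Char → Nat
  | [] => 0
  | c :: rest => if w.contains c then 0 else rN w rest + 1

theorem rN_le (w cs : List Char) : rN w cs ≤ cs.length := by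
  induction cs with
  | nil => simp [rN]
  | cons c rest ih => simp only [rN]; split <;> simp <;> omega

theorem rN_hit (w cs : List Char) (h : rN w cs < cs.length) :
    ∃ c, cs[rN w cs]? = some c ∧ w.contains c = true := by
  induction cs with
  | nil => simp at h
  | cons c rest ih =>
    by_cases hc : w.contains c = true
    · have hr0 : rN w (c :: rest) = 0 := by simp only [rN]; rw [if_pos hc]
      exact ⟨c, by simp [hr0], hc⟩
    · have hr : rN w (c :: rest) = rN w rest + 1 := by simp only [rN]; rw [if_neg hc]
      rw [hr] at h ⊢
      simp only [List.length_cons] at h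
      obtain ⟨c', hg, hw⟩ := ih (by omega)
      exact ⟨c', by simpa using hg, hw⟩

theorem rN_le_idxOf (w cs : List Char) (c : Char) (hc : c ∈ cs) (hw : w.contains c = true) :
    rN w cs ≤ cs.idxOf c := by
  induction cs with
  | nil => simp at hc
  | cons c' rest ih =>
    simp only [rN]
    split <;> rename_i h
    · omega
    · have hne : c' ≠ c := by rintro rfl; exact h hw
      have hm : c ∈ rest := by
        rcases List.mem_cons.mp hc with h1 | h1
        · exact absurd h1.symm hne
        · exact h1
      rw [List.idxOf_cons_ne _ (by simpa using hne)]
      have := ih hm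
      omega

theorem wfIdxOf_le (cs : List Char) (c : Char) (k : Nat) (h : cs[k]? = some c) :
    cs.idxOf c ≤ k := by
  induction cs generalizing k with
  | nil => simp at h
  | cons x xs ih =>
    match k with
    | 0 => simp_all
    | k+1 =>
      simp only [List.getElem?_cons_succ] at h
      by_cases hx : x = c
      · subst hx; simp
      · rw [List.idxOf_cons_ne _ (by simpa using hx)]
        exact Nat.succ_le_succ (ih k h)

theorem wfRemoveAll_skip (l : List String) (x : String) (xs : List String)
    (hl : ∀ i ∈ l, i ≠ x) : wfRemoveAll (x :: xs) l = x :: wfRemoveAll xs l := by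
  induction l generalizing xs with
  | nil => simp [wfRemoveAll]
  | cons i is ih =>
    have hix : i ≠ x := hl i (by simp)
    have hstep : (PySem.List.remove? (x :: xs) i).getD (x :: xs)
        = x :: (PySem.List.remove? xs i).getD xs := by
      rw [PySem.List.remove?_cons_of_ne xs (Ne.symm hix)]
      cases PySem.List.remove? xs i <;> simp
    simp only [wfRemoveAll, List.foldl_cons] at *
    rw [hstep, ih _ (fun j hj => hl j (by simp [hj]))]

theorem wfRemoveAll_filter (p : String → Bool) (g : List String) :
    wfRemoveAll g (g.filter p) = g.filter (fun w => !p w) := by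
  induction g with
  | nil => simp [wfRemoveAll]
  | cons x xs ih =>
    by_cases hx : p x = true
    · rw [List.filter_cons_of_pos hx]
      simp only [wfRemoveAll, List.foldl_cons, PySem.List.remove?_cons_self, Option.getD_some]
      simpa [hx] using ih
    · rw [List.filter_cons_of_neg hx]
      rw [wfRemoveAll_skip _ _ _ (by
        intro i hi hix
        exact hx (by rw [← hix]; exact List.of_mem_filter hi))]
      simp [hx, ih]

theorem wfIsIn_singleton (c : Char) (l : List Char) :
    PySem.Chars.isIn [c] l = l.contains c := by
  by_cases h : c ∈ l
  · simp [(PySem.Chars.isIn_iff_infix [c] l).mpr ((List.singleton_infix_iff c l).mpr h), h]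
  · have : ¬ ([c] <:+: l) := fun hin => h ((List.singleton_infix_iff c l).mp hin)
    simp [(PySem.Chars.isIn_eq_false_iff [c] l).mpr this, h]

theorem wfLoopA_step (c : Char) (rest : List Char) (grid : List String) :
    wfLoopA (c :: rest) grid =
      if grid.length ≤ 1 then grid
      else wfLoopA rest (grid.filter (fun w => !(w.toList.contains c))) := by
  simp only [wfLoopA]
  split
  · rfl
  · rw [PySem.List.foldl_append_if_eq_filter]
    rw [List.nil_append]
    have : (fun (word : String) => PySem.Chars.isIn [c] word.toList)
         = (fun (word : String) => word.toList.contains c) := by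
      funext w; exact wfIsIn_singleton c w.toList
    rw [this, wfRemoveAll_filter]

theorem wfPos_aux (cs : List Char) (s : Int) (d : PySem.Dict Char Int) (c : Char) :
    ((PySem.List.enumerate cs s).foldl
        (fun d p => if d.contains p.2 then d else d.insert p.2 p.1) d).get? c
      = if d.contains c then d.get? c
        else if c ∈ cs then some (s + (cs.idxOf c : Int)) else none := by
  induction cs generalizing s d with
  | nil =>
    simp only [PySem.List.enumerate_nil, List.foldl_nil, List.not_mem_nil, if_false]
    by_cases h : d.contains c = true
    · simp [h]
    · simp only [Bool.not_eq_true] at h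
      simp [h, (PySem.Dict.get?_eq_none_iff_contains d c).mpr h]
  | cons x cs ih =>
    rw [PySem.List.enumerate_cons, List.foldl_cons]
    by_cases hx : d.contains x = true
    · rw [if_pos hx, ih]
      by_cases hc : d.contains c = true
      · simp [hc]
      · have hcx : c ≠ x := by rintro rfl; rw [hx] at hc; exact hc rfl
        simp only [hc, List.mem_cons]
        by_cases hm : c ∈ cs
        · simp only [hm, if_true, or_true]
          rw [List.idxOf_cons_ne _ (by simpa using Ne.symm hcx)]
          simp only [Bool.false_eq_true, if_false]
          congr 1
          push_cast
          ring
        · simp [hm, hcx]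
    · rw [if_neg hx, ih]
      by_cases hcx : c = x
      · subst hcx
        rw [PySem.Dict.contains_insert]
        simp [PySem.Dict.get?_insert_self, hx, List.idxOf_cons_self]
      · rw [PySem.Dict.contains_insert, PySem.Dict.get?_insert_of_ne _ _ hcx]
        have : (c == x) = false := by simpa using hcx
        simp only [this, Bool.false_or]
        by_cases hc : d.contains c = true
        · simp [hc]
        · simp only [hc, List.mem_cons, hcx, false_or]
          by_cases hm : c ∈ cs
          · simp only [hm, if_true]
            rw [List.idxOf_cons_ne _ (by simpa using Ne.symm hcx)]
            simp only [Bool.false_eq_true, if_false]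
            congr 1
            push_cast
            ring
          · simp [hm]

theorem wfPos_get (cs : List Char) (c : Char) :
    (wfPos cs).get? c = if c ∈ cs then some ((cs.idxOf c : Int)) else none := by
  rw [wfPos, wfPos_aux]
  simp [PySem.Dict.contains_empty]

theorem wfRfold_le (pos : PySem.Dict Char Int) (l : List Char) (r0 : Int) :
    (l.foldl (fun r c => match pos.get? c with
        | some p => if p < r then p else r
        | none => r) r0) ≤ r0 ∧
    (∀ c ∈ l, ∀ p, pos.get? c = some p →
      (l.foldl (fun r c => match pos.get? c with
        | some p => if p < r then p else r
        | none => r) r0) ≤ p) := by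
  induction l generalizing r0 with
  | nil => simp
  | cons c ls ih =>
    simp only [List.foldl_cons]
    have hstep : (match pos.get? c with
        | some p => if p < r0 then p else r0
        | none => r0) ≤ r0 := by
      cases pos.get? c with
      | none => simp
      | some p => simp only; split <;> omega
    obtain ⟨h1, h2⟩ := ih (match pos.get? c with
        | some p => if p < r0 then p else r0
        | none => r0)
    refine ⟨le_trans h1 hstep, ?_⟩
    intro c' hc' p hp
    rcases List.mem_cons.mp hc' with rfl | hmem
    · refine le_trans h1 ?_
      rw [hp]
      simp only
      split <;> omega
    · exact h2 c' hmem p hp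

theorem wfRfold_cases (pos : PySem.Dict Char Int) (l : List Char) (r0 : Int) :
    (l.foldl (fun r c => match pos.get? c with
        | some p => if p < r then p else r
        | none => r) r0) = r0 ∨
    ∃ c ∈ l, pos.get? c = some (l.foldl (fun r c => match pos.get? c with
        | some p => if p < r then p else r
        | none => r) r0) := by
  induction l generalizing r0 with
  | nil => simp
  | cons c ls ih =>
    simp only [List.foldl_cons]
    rcases ih (match pos.get? c with
        | some p => if p < r0 then p else r0
        | none => r0) with h | ⟨c', hmem, hg⟩
    · rw [h]
      cases hg : pos.get? c with
      | none => simp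
      | some p =>
        simp only
        split
        · exact Or.inr ⟨c, by simp, hg⟩
        · simp
    · exact Or.inr ⟨c', by simp [hmem], hg⟩

theorem wfR_eq (cs : List Char) (w : String) :
    wfR (wfPos cs) (cs.length : Int) w = ((rN w.toList cs : Nat) : Int) := by
  rw [wfR]
  obtain ⟨hle, hlb⟩ := wfRfold_le (wfPos cs) w.toList (cs.length : Int)
  have hcases := wfRfold_cases (wfPos cs) w.toList (cs.length : Int)
  set F := w.toList.foldl (fun r c => match (wfPos cs).get? c with
        | some p => if p < r then p else r
        | none => r) (cs.length : Int) with hF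
  have hge : ((rN w.toList cs : Nat) : Int) ≤ F := by
    rcases hcases with h | ⟨c, hmem, hg⟩
    · rw [h]; exact_mod_cast rN_le w.toList cs
    · rw [wfPos_get] at hg
      by_cases hmc : c ∈ cs
      · rw [if_pos hmc] at hg
        have hFi : F = (cs.idxOf c : Int) := by injection hg with h'; omega
        have := rN_le_idxOf w.toList cs c hmc (by simpa using hmem)
        omega
      · rw [if_neg hmc] at hg; exact absurd hg (by simp)
  have hle2 : F ≤ ((rN w.toList cs : Nat) : Int) := by
    by_cases hr : rN w.toList cs < cs.length
    · obtain ⟨c, hg, hw⟩ := rN_hit w.toList cs hr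
      have hmw : c ∈ w.toList := by simpa using hw
      have hmc : c ∈ cs := List.mem_of_getElem? hg
      have hp : (wfPos cs).get? c = some ((cs.idxOf c : Nat) : Int) := by
        rw [wfPos_get, if_pos hmc]
      have h1 := hlb c hmw _ hp
      have h2 := wfIdxOf_le cs c _ hg
      omega
    · have := rN_le w.toList cs
      omega
  omega

theorem wfCnt_aux (pos : PySem.Dict Char Int) (n : Int) (words : List String)
    (d : PySem.Dict Int Int) (k : Int) :
    (words.foldl (fun d w => d.insert (wfR pos n w) (d.getD (wfR pos n w) 0 + 1)) d).getD k 0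
      = d.getD k 0 + (words.countP (fun w => wfR pos n w == k) : Int) := by
  induction words generalizing d with
  | nil => simp
  | cons w ws ih =>
    simp only [List.foldl_cons, ih, List.countP_cons]
    by_cases hk : wfR pos n w = k
    · subst hk
      simp [PySem.Dict.getD_insert]
      ring
    · have : (d.insert (wfR pos n w) (d.getD (wfR pos n w) 0 + 1)).getD k 0 = d.getD k 0 := by
        simp [PySem.Dict.getD_insert]
        intro h
        exact absurd h.symm hk
      rw [this]
      have hb : (wfR pos n w == k) = false := by simpa using hk
      simp [hb]

theorem wfCnt_getD (pos : PySem.Dict Char Int) (n : Int) (words : List String) (k : Int) :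
    (wfCnt pos n words).getD k 0 = (words.countP (fun w => wfR pos n w == k) : Int) := by
  rw [wfCnt, wfCnt_aux]
  simp

theorem wfCountP_split (cs : List Char) (l : List String) (k : Nat) :
    l.countP (fun w => decide (k ≤ rN w.toList cs))
      = l.countP (fun w => decide (rN w.toList cs = k))
        + l.countP (fun w => decide (k + 1 ≤ rN w.toList cs)) := by
  induction l with
  | nil => simp
  | cons w ws ih =>
    simp only [List.countP_cons, ih]
    rcases Nat.lt_trichotomy (rN w.toList cs) k with h | h | h
    · have h1 : ¬ (k ≤ rN w.toList cs) := by omega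
      have h2 : ¬ (rN w.toList cs = k) := by omega
      have h3 : ¬ (k + 1 ≤ rN w.toList cs) := by omega
      simp [h1, h2, h3]
    · simp [h]
      omega
    · have h1 : k ≤ rN w.toList cs := by omega
      have h2 : ¬ (rN w.toList cs = k) := by omega
      have h3 : k + 1 ≤ rN w.toList cs := by omega
      simp [h1, h2, h3]
      omega

theorem wfFilter_step (cs : List Char) (l : List String) (k : Nat) (hk : k < cs.length) :
    (l.filter (fun w => decide (k ≤ rN w.toList cs))).filter
        (fun w => !(w.toList.contains (cs[k]'hk)))
      = l.filter (fun w => decide (k + 1 ≤ rN w.toList cs)) := by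
  rw [List.filter_filter]
  apply List.filter_congr
  intro w _
  by_cases h1 : rN w.toList cs < k
  · have h4 : ¬ (k ≤ rN w.toList cs) := by omega
    have h5 : ¬ (k + 1 ≤ rN w.toList cs) := by omega
    simp [h4, h5]
  · by_cases h2 : rN w.toList cs = k
    · obtain ⟨c, hg', hw⟩ := rN_hit w.toList cs (by omega)
      rw [h2, List.getElem?_eq_getElem hk] at hg'
      injection hg' with hc
      rw [← hc] at hw
      have h5 : ¬ (k + 1 ≤ rN w.toList cs) := by omega
      have hmem : (cs[k]'hk) ∈ w.toList := by simpa using hw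
      simp [hmem, h5]
    · have h3 : k + 1 ≤ rN w.toList cs := by omega
      have h4 : k ≤ rN w.toList cs := by omega
      have hnc : w.toList.contains (cs[k]'hk) = false := by
        by_contra hcc
        simp only [Bool.not_eq_false] at hcc
        have hmc : (cs[k]'hk) ∈ cs := List.getElem_mem hk
        have ha := rN_le_idxOf w.toList cs _ hmc hcc
        have hb := wfIdxOf_le cs (cs[k]'hk) k (List.getElem?_eq_getElem hk)
        omega
      have hmem : (cs[k]'hk) ∉ w.toList := by simpa using hnc
      simp [hmem, h3, h4]

theorem wfMain (cs : List Char) (grid0 : List String) :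
    ∀ (m k : Nat), k ≤ cs.length → cs.length - k = m →
    ((wfLoopA (cs.drop k) (grid0.filter (fun w => decide (k ≤ rN w.toList cs)))).length : Int)
      = wfLoopB (wfCnt (wfPos cs) (cs.length : Int) grid0)
          (PySem.List.pyRange (k : Int) (cs.length : Int) 1)
          (((grid0.filter (fun w => decide (k ≤ rN w.toList cs))).length : Int)) := by
  intro m
  induction m with
  | zero =>
    intro k hk hm
    have hkeq : k = cs.length := by omega
    subst hkeq
    rw [List.drop_length]
    have hrange : PySem.List.pyRange (cs.length : Int) (cs.length : Int) 1 = [] := by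
      simp [PySem.List.pyRange]
    rw [hrange]
    simp [wfLoopA, wfLoopB]
  | succ m ih =>
    intro k hk hm
    have hklt : k < cs.length := by omega
    rw [show cs.drop k = cs[k] :: cs.drop (k + 1) from List.drop_eq_getElem_cons hklt]
    rw [wfLoopA_step]
    rw [PySem.List.pyRange_one_cons (by exact_mod_cast hklt)]
    simp only [wfLoopB]
    by_cases hG : (grid0.filter (fun w => decide (k ≤ rN w.toList cs))).length ≤ 1
    · rw [if_pos hG, if_pos (by exact_mod_cast hG)]
    · rw [if_neg hG, if_neg (by
        intro hc
        exact hG (by exact_mod_cast hc))]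
      rw [wfFilter_step cs grid0 k hklt]
      have hcnt : (wfCnt (wfPos cs) (cs.length : Int) grid0).getD (k : Int) 0
          = (grid0.countP (fun w => decide (rN w.toList cs = k)) : Int) := by
        rw [wfCnt_getD]
        congr 1
        apply List.countP_congr
        intro w _
        rw [wfR_eq]
        simp [Nat.cast_inj]
      have hsplit := wfCountP_split cs grid0 k
      have hlen1 : (grid0.filter (fun w => decide (k ≤ rN w.toList cs))).length
          = grid0.countP (fun w => decide (k ≤ rN w.toList cs)) :=
        List.countP_eq_length_filter.symm
      have hlen2 : (grid0.filter (fun w => decide (k + 1 ≤ rN w.toList cs))).length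
          = grid0.countP (fun w => decide (k + 1 ≤ rN w.toList cs)) :=
        List.countP_eq_length_filter.symm
      have hval : ((grid0.filter (fun w => decide (k ≤ rN w.toList cs))).length : Int)
            - (wfCnt (wfPos cs) (cs.length : Int) grid0).getD (k : Int) 0
          = ((grid0.filter (fun w => decide (k + 1 ≤ rN w.toList cs))).length : Int) := by
        rw [hcnt]
        omega
      rw [hval]
      have hcast : ((k : Int) + 1) = (((k + 1 : Nat)) : Int) := by push_cast; ring
      rw [hcast]
      exact ih (k + 1) (by omega) (by omega)

-- ===== VERDICT (by name: the statement is the Claim_ definition above) =====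
theorem wordfinder_spec : Claim_equal_wordfinder := by
  intro arg1 arg2 _
  unfold Spec_wordfinder wordfinder wordfinder_alt
  have h0 : arg2.filter (fun w => decide (0 ≤ rN w.toList arg1.toList)) = arg2 := by
    simp
  have := wfMain arg1.toList arg2 arg1.toList.length 0 (by omega) (by omega)
  rw [h0] at this
  simpa using this
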